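-- pv_equiv track=rewrite | github.com/joynal/adventofcode-solutions | trebuchet.py | part_1
-- ===== SOURCE A (Python) =====
-- def part_1(line):
--   digits = []
--
--   for char in line:
--     if char.isdigit():
--       digits.append(char)
--
--   if not digits:
--     return 0
--
--   return int(digits[0] + digits[-1])
-- ===== SOURCE B (Python) =====
-- def part_1(line):
--   first = next((c for c in line if c.isdigit()), None)
--   if first is None:
--     return 0
--   last = next(c for c in reversed(line) if c.isdigit())
--   return int(first + last)
-- ===== Notes on version B (the rewrite author's own statement) =====
-- stated objective: alternative
-- what changed: B replaces A's accumulate-all-digits pass plus indexing with two anchored scans: find the first digit from the left and the first digit from the right, no intermediate list.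
import Mathlib
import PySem

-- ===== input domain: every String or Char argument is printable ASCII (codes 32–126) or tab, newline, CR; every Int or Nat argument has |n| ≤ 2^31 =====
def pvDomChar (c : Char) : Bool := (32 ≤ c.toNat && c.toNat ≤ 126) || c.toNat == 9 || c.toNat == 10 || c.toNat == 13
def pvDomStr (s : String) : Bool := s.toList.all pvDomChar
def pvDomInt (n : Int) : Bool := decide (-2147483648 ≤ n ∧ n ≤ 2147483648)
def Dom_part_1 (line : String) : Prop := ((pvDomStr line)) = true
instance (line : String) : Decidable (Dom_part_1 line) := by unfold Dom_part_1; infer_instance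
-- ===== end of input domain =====

-- B scans for the first digit from the left and from the right instead of collecting all digits; alternative decomposition, same cost.
-- ===== PORT A =====
def part_1 (line : String) : Int :=
  let digits := line.toList.foldl (fun acc c => if PySem.Chars.isdigit c then acc ++ [c] else acc) []
  if digits = [] then 0
  else (PySem.Int.ofChars? [PySem.List.pyGetD digits 0 ' ', PySem.List.pyGetD digits (-1) ' ']).getD 0

-- ===== PORT B =====
def part_1_alt (line : String) : Int :=
  match line.toList.find? PySem.Chars.isdigit with
  | none => 0
  | some first =>
    match line.toList.reverse.find? PySem.Chars.isdigit with
    | none => 0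
    | some last => (PySem.Int.ofChars? [first, last]).getD 0

-- ===== PRECONDITION & SPEC =====
def Spec_part_1 (line : String) (out : Int) : Prop := out = part_1_alt line
instance (line : String) (out : Int) : Decidable (Spec_part_1 line out) := by unfold Spec_part_1; infer_instance

-- ===== CLAIM (what is proved, stated in full; the proofs are below) =====
def Claim_equal_part_1 : Prop := ∀ (line : String), Dom_part_1 line → Spec_part_1 line (part_1 line)

-- ===== LEMMAS AND PROOFS =====

lemma pvFind_eq_head?_filter (p : Char → Bool) (l : List Char) :
    l.find? p = (l.filter p).head? := by
  induction l with
  | nil => simp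
  | cons a t ih =>
    rw [List.filter_cons, List.find?_cons]
    cases hp : p a
    · simpa using ih
    · simp

lemma pvGetD_zero_eq_head (xs : List Char) (d : Char) (h : xs ≠ []) :
    xs.getD 0 d = xs.head h := by
  cases xs with
  | nil => exact absurd rfl h
  | cons a t => rfl

-- ===== VERDICT (by name: the statement is the Claim_ definition above) =====
theorem part_1_spec : Claim_equal_part_1 := by
  intro line _
  unfold Spec_part_1 part_1 part_1_alt
  simp only [PySem.List.foldl_append_if_eq_filter, List.nil_append,
    pvFind_eq_head?_filter, List.filter_reverse, List.head?_reverse]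
  by_cases h : line.toList.filter PySem.Chars.isdigit = []
  · simp [h]
  · rw [if_neg h]
    rw [PySem.List.pyGetD_neg_one _ _ h, PySem.List.pyGetD_zero,
      List.getLast?_eq_some_getLast (h := h), List.head?_eq_some_head (h := h)]
    rw [pvGetD_zero_eq_head _ _ h]
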